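-- pv_equiv track=rewrite | github.com/AlexandreBare/image-processing-object-detection | opencv_process_video.py | grid_search_heuristic
-- ===== SOURCE A (Python) =====
-- def grid_search_heuristic(hyperparams):
--     # An heuristic for grid search that only returns a subset of the combinations of parameter values possible
--     grid = []
--     for i, hyperparam_values in zip(range(len(hyperparams)), hyperparams):
--         for hyperparam_value in hyperparam_values:
--             combination = []
--             for j, hyperparam_values2 in zip(range(len(hyperparams)), hyperparams):
--                 if i != j:
--                     combination += [hyperparam_values2[len(hyperparam_values2)//2]]
--                 else:
--                     combination += [hyperparam_value]
--             grid += [combination]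
--     return grid
-- ===== SOURCE B (Python) =====
-- def grid_search_heuristic(hyperparams):
--     # Recursive sweep: carry the list of medians of the already-processed prefix,
--     # emit each row as prefix + [v] + suffix-medians, then recurse on the tail.
--     if not any(hyperparams):
--         return []
--
--     def go(prefix, rest):
--         if not rest:
--             return []
--         vals, tail = rest[0], rest[1:]
--         suffix = [t[len(t) // 2] for t in tail]
--         rows = [prefix + [v] + suffix for v in vals]
--         return rows + go(prefix + [vals[len(vals) // 2]], tail)
--
--     return go([], hyperparams)
-- ===== Notes on version B (the rewrite author's own statement) =====
-- stated objective: alternative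
-- what changed: B is a structural recursion over the parameter list that carries the medians of the already-processed prefix and emits each row as prefix + [v] + suffix-medians by concatenation, replacing A's triple nested loop with its per-element i != j branch.
import Mathlib
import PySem

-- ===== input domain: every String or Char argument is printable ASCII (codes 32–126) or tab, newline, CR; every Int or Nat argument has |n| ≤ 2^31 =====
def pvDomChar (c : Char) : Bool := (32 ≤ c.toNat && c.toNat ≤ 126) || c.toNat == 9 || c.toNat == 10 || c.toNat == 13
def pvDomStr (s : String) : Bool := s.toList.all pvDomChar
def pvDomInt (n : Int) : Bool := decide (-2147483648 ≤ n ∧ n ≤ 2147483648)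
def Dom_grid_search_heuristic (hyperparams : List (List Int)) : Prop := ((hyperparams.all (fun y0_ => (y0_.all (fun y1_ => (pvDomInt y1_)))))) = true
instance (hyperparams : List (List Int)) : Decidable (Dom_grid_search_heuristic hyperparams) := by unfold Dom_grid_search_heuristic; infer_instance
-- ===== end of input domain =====

-- B replaces A's triple nested loop (with its i != j branch) by a structural recursion that
-- carries the prefix medians and builds each row as prefix ++ [v] ++ suffix-medians
-- (objective: alternative, same asymptotic cost).

-- ===== PORT A =====
-- vals[len(vals)//2]; the index is nonnegative, so Nat division matches Python's //.
-- On an empty list Python raises IndexError (excluded by Pre_); the port defaults to 0 there.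
def pvMedian (vs : List Int) : Int := vs.getD (vs.length / 2) 0

def grid_search_heuristic (hyperparams : List (List Int)) : List (List Int) :=
  (PySem.List.enumerate hyperparams).foldl (fun grid iv =>
    iv.2.foldl (fun grid v =>
      grid ++ [ (PySem.List.enumerate hyperparams).foldl (fun comb jv =>
        if iv.1 ≠ jv.1 then comb ++ [pvMedian jv.2] else comb ++ [v]) [] ]) grid) []

-- ===== PORT B =====
-- go(prefix, rest) of Source B; in the mixed empty/non-empty case (outside Pre_) Python B raises
-- IndexError at t[len(t)//2], where this total port uses pvMedian's default.
def pvGo (pre : List Int) : List (List Int) → List (List Int)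
  | [] => []
  | vals :: tail =>
      let suffix := tail.map pvMedian
      (vals.map (fun v => pre ++ [v] ++ suffix)) ++ pvGo (pre ++ [pvMedian vals]) tail

def grid_search_heuristic_alt (hyperparams : List (List Int)) : List (List Int) :=
  if hyperparams.all (fun vs => vs.isEmpty) then []
  else pvGo [] hyperparams

-- ===== PRECONDITION & SPEC =====
-- Pre_ excludes the mixed case (some empty and some nonempty parameter list), on which the
-- Python A raises IndexError at vals[len(vals)//2]; B raises there too.
def Pre_grid_search_heuristic (hyperparams : List (List Int)) : Prop :=
  (∀ l ∈ hyperparams, l ≠ []) ∨ (∀ l ∈ hyperparams, l = [])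
instance (hyperparams : List (List Int)) : Decidable (Pre_grid_search_heuristic hyperparams) := by
  unfold Pre_grid_search_heuristic; infer_instance

def pvWitness_grid_search_heuristic : List (List Int) := [[1, 2], [3]]

def Spec_grid_search_heuristic (hyperparams : List (List Int)) (out : List (List Int)) : Prop := out = grid_search_heuristic_alt hyperparams
instance (hyperparams : List (List Int)) (out : List (List Int)) : Decidable (Spec_grid_search_heuristic hyperparams out) := by unfold Spec_grid_search_heuristic; infer_instance

-- ===== CLAIM (what is proved, stated in full; the proofs are below) =====
def Claim_equal_grid_search_heuristic : Prop := ∀ (hyperparams : List (List Int)), Dom_grid_search_heuristic hyperparams → Pre_grid_search_heuristic hyperparams → Spec_grid_search_heuristic hyperparams (grid_search_heuristic hyperparams)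

-- ===== LEMMAS AND PROOFS =====

theorem pv_flatten_map_singleton {α β : Type} (f : α → β) :
    ∀ (l : List α), (l.map (fun x => [f x])).flatten = l.map f := by
  intro l
  induction l with
  | nil => rfl
  | cons a t ih => simp [ih]

-- A's inner combination loop computes the median template with slot i overridden by v.
theorem pv_inner_key (v : Int) : ∀ (hp : List (List Int)) (s i : Int),
    (PySem.List.enumerate hp s).map (fun jv => if i ≠ jv.1 then pvMedian jv.2 else v) =
      if s ≤ i then (hp.map pvMedian).set (i - s).toNat v else hp.map pvMedian := by
  intro hp
  induction hp with
  | nil => intro s i; simp [PySem.List.enumerate_nil]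
  | cons x xs ih =>
    intro s i
    rw [PySem.List.enumerate_cons]
    simp only [List.map_cons, ih (s + 1) i]
    by_cases hsi : i = s
    · subst hsi
      have h1 : ¬ (i + 1 ≤ i) := by omega
      simp [h1]
    · by_cases hle : s ≤ i
      · have hle' : s + 1 ≤ i := by omega
        have hn : (i - s).toNat = (i - (s + 1)).toNat + 1 := by omega
        simp [hsi, hle, hle', hn]
      · have hle' : ¬ (s + 1 ≤ i) := by omega
        simp [hsi, hle, hle']

-- A's whole value: one row per (i, v), the median template with slot i set to v.
theorem pv_A_char (hp : List (List Int)) :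
    grid_search_heuristic hp =
      (PySem.List.enumerate hp 0).flatMap (fun iv =>
        iv.2.map (fun v => (hp.map pvMedian).set iv.1.toNat v)) := by
  unfold grid_search_heuristic
  have h1 : (PySem.List.enumerate hp 0).foldl (fun grid iv =>
      iv.2.foldl (fun grid v =>
        grid ++ [ (PySem.List.enumerate hp).foldl (fun comb jv =>
          if iv.1 ≠ jv.1 then comb ++ [pvMedian jv.2] else comb ++ [v]) [] ]) grid) [] =
      (PySem.List.enumerate hp 0).foldl (fun grid iv =>
        grid ++ iv.2.map (fun v => (hp.map pvMedian).set iv.1.toNat v)) [] := by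
    apply PySem.List.foldl_congr_mem
    intro grid iv hiv
    rcases (PySem.List.mem_enumerate_iff _ _ _).1 hiv with ⟨k, hk, rfl⟩
    have hstep : ∀ (g : List (List Int)) (v : Int),
        (fun grid v =>
          grid ++ [ (PySem.List.enumerate hp).foldl (fun comb jv =>
            if ((0 : Int) + (k : Int), hp[k]).1 ≠ jv.1 then comb ++ [pvMedian jv.2]
            else comb ++ [v]) [] ]) g v =
        g ++ [ ((hp.map pvMedian).set ((0 : Int) + (k : Int), hp[k]).1.toNat v) ] := by
      intro g v
      have hrow : ∀ (comb : List Int) (jv : Int × List Int),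
          (if ((0 : Int) + (k : Int), hp[k]).1 ≠ jv.1 then comb ++ [pvMedian jv.2]
            else comb ++ [v]) = comb ++ [if ((0 : Int) + (k : Int)) ≠ jv.1 then pvMedian jv.2 else v] := by
        intro comb jv; split_ifs <;> rfl
      simp only [hrow]
      rw [PySem.List.foldl_append_eq_flatMap (g := fun jv : Int × List Int =>
        [if (0 + (k : Int)) ≠ jv.1 then pvMedian jv.2 else v])]
      rw [List.flatMap_def, pv_flatten_map_singleton, pv_inner_key]
      simp
    simp only [hstep]
    rw [PySem.List.foldl_append_eq_flatMap (g := fun v : Int =>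
      [ (hp.map pvMedian).set ((0 : Int) + (k : Int), hp[k]).1.toNat v ])]
    rw [List.flatMap_def, pv_flatten_map_singleton]
  rw [h1, PySem.List.foldl_append_eq_flatMap (g := fun iv : Int × List Int =>
    iv.2.map (fun v => (hp.map pvMedian).set iv.1.toNat v))]
  simp

-- B's recursion: same rows, prefix carried explicitly.
theorem pv_B_char : ∀ (rest : List (List Int)) (pre : List Int) (s : Int), 0 ≤ s →
    pvGo pre rest = (PySem.List.enumerate rest s).flatMap (fun iv =>
      iv.2.map (fun v => pre ++ (rest.map pvMedian).set (iv.1 - s).toNat v)) := by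
  intro rest
  induction rest with
  | nil => intro pre s _; simp [pvGo, PySem.List.enumerate_nil]
  | cons vals tail ih =>
    intro pre s hs
    rw [PySem.List.enumerate_cons]
    simp only [List.flatMap_cons]
    unfold pvGo
    dsimp only
    congr 1
    · apply List.map_congr_left
      intro v _
      simp
    · rw [ih (pre ++ [pvMedian vals]) (s + 1) (by omega)]
      rw [List.flatMap_def, List.flatMap_def]
      congr 1
      apply List.map_congr_left
      intro iv hiv
      rcases (PySem.List.mem_enumerate_iff _ _ _).1 hiv with ⟨k, hk, rfl⟩
      apply List.map_congr_left
      intro v _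
      have hn : ((s + 1 + (k : Int)) - s).toNat = ((s + 1 + (k : Int)) - (s + 1)).toNat + 1 := by
        omega
      simp [hn]

-- If every parameter list is empty, A's outer loop never appends anything.
theorem pv_all_empty (f : (Int × List Int) → List (List Int) → Int → List (List Int)) :
    ∀ (L : List (Int × List Int)) (init : List (List Int)), (∀ p ∈ L, p.2 = ([] : List Int)) →
      L.foldl (fun grid iv => iv.2.foldl (f iv) grid) init = init := by
  intro L
  induction L with
  | nil => intro init _; rfl
  | cons p ps ih =>
    intro init h
    have hp : p.2 = [] := h p (List.mem_cons_self)
    simp only [List.foldl_cons, hp, List.foldl_nil]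
    exact ih init (fun q hq => h q (List.mem_cons_of_mem _ hq))

-- ===== VERDICT (by name: the statement is the Claim_ definition above) =====
theorem grid_search_heuristic_spec : Claim_equal_grid_search_heuristic := by
  intro hp _ _
  unfold Spec_grid_search_heuristic grid_search_heuristic_alt
  by_cases hall : hp.all (fun vs => vs.isEmpty) = true
  · simp only [hall, if_pos]
    unfold grid_search_heuristic
    apply pv_all_empty
    intro p hpmem
    rcases (PySem.List.mem_enumerate_iff _ _ _).1 hpmem with ⟨k, hk, rfl⟩
    have := List.all_eq_true.1 hall _ (List.getElem_mem hk)
    simpa [List.isEmpty_iff] using this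
  · simp only [hall]
    rw [pv_A_char, pv_B_char hp [] 0 le_rfl]
    simp
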